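-- pv_equiv track=rewrite | github.com/hahyuning/Coding-test-study | problem_solving/2021/210814 + t/210814_t2.py | solution
-- ===== SOURCE A (Python) =====
-- def solution(seconds):
--     snack = [[300, 10], [130, 30], [120, 20], [20, 30]]
--
--     ans = 0
--     for time, x in snack:
--         cnt = 0
--         while time * (cnt + 1) <= seconds and cnt + 1 <= x:
--             cnt += 1
--         seconds -= time * cnt
--         ans += cnt
--
--     return ans
-- ===== SOURCE B (Python) =====
-- def solution(seconds):
--     ans = 0
--     for time, x in [[300, 10], [130, 30], [120, 20], [20, 30]]:
--         cnt = max(0, min(seconds // time, x))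
--         seconds -= time * cnt
--         ans += cnt
--     return ans
-- ===== Notes on version B (the rewrite author's own statement) =====
-- stated objective: simpler
-- what changed: The inner incremental while-loop counting one snack at a time is replaced by the closed-form count max(0, min(seconds // time, x)) per item.
import Mathlib
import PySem

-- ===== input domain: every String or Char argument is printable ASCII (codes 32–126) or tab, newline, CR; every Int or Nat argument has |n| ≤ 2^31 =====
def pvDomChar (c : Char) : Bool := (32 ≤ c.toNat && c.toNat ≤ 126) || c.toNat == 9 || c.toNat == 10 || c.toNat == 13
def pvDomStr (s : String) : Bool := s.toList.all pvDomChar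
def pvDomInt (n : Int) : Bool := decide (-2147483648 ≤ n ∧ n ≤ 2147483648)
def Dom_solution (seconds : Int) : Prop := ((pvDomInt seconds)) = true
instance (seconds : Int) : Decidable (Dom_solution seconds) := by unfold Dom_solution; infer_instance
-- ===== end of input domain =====

-- B replaces A's inner incremental while-loop by the closed-form per-item count
-- max 0 (min (seconds // time) x): simpler direct arithmetic, same results.


-- ===== PORT A =====
-- A's inner 'while time*(cnt+1) <= seconds and cnt+1 <= x: cnt += 1' loop;
-- terminates because cnt strictly approaches x.
def loopA (t x s cnt : Int) : Int :=
  if h : t * (cnt + 1) ≤ s ∧ cnt + 1 ≤ x then loopA t x s (cnt + 1) else cnt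
termination_by (x - cnt).toNat
decreasing_by omega

def solution (seconds : Int) : Int :=
  let snack : List (Int × Int) := [(300, 10), (130, 30), (120, 20), (20, 30)]
  (snack.foldl (fun (acc : Int × Int) p =>
      let cnt := loopA p.1 p.2 acc.2 0
      (acc.1 + cnt, acc.2 - p.1 * cnt)) (0, seconds)).1

-- ===== PORT B =====
def solution_alt (seconds : Int) : Int :=
  (([(300, 10), (130, 30), (120, 20), (20, 30)] : List (Int × Int)).foldl
    (fun (acc : Int × Int) p =>
      let cnt := max 0 (min (PySem.Int.floordiv acc.2 p.1) p.2)
      (acc.1 + cnt, acc.2 - p.1 * cnt)) (0, seconds)).1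

-- ===== PRECONDITION & SPEC =====
def Spec_solution (seconds : Int) (out : Int) : Prop := out = solution_alt seconds
instance (seconds : Int) (out : Int) : Decidable (Spec_solution seconds out) := by unfold Spec_solution; infer_instance

-- ===== CLAIM (what is proved, stated in full; the proofs are below) =====
def Claim_equal_solution : Prop := ∀ (seconds : Int), Dom_solution seconds → Spec_solution seconds (solution seconds)

-- ===== LEMMAS AND PROOFS =====
theorem loopA_eq (t x s cnt : Int) (ht : 0 < t) :
    loopA t x s cnt = max cnt (min (PySem.Int.floordiv s t) x) := by
  rw [loopA]
  have hfd : PySem.Int.floordiv s t = s / t := PySem.Int.floordiv_eq_ediv_of_pos ht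
  split_ifs with h
  · obtain ⟨h1, h2⟩ := h
    have h1' : cnt + 1 ≤ s / t := by
      rw [Int.le_ediv_iff_mul_le ht]; linarith [h1, mul_comm t (cnt + 1)]
    have := loopA_eq t x s (cnt + 1) ht
    rw [this]; rw [hfd] at *; omega
  · have h' : ¬ (cnt + 1 ≤ s / t) ∨ ¬ (cnt + 1 ≤ x) := by
      by_contra hcon
      push Not at hcon
      obtain ⟨ha, hb⟩ := hcon
      exact h ⟨by calc t * (cnt + 1) = (cnt + 1) * t := mul_comm _ _
                  _ ≤ s := (Int.le_ediv_iff_mul_le ht).mp ha, hb⟩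
    rw [hfd] at *; omega
termination_by (x - cnt).toNat
decreasing_by omega

theorem loopA_closed (t x s : Int) (ht : 0 < t) :
    loopA t x s 0 = max 0 (min (PySem.Int.floordiv s t) x) := by
  exact loopA_eq t x s 0 ht

-- ===== VERDICT (by name: the statement is the Claim_ definition above) =====
theorem solution_spec : Claim_equal_solution := by
  intro s _
  unfold Spec_solution solution solution_alt
  simp only [List.foldl,
    loopA_closed 300 10 _ (by norm_num),
    loopA_closed 130 30 _ (by norm_num),
    loopA_closed 120 20 _ (by norm_num),
    loopA_closed 20 30 _ (by norm_num)]
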